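-- pv_equiv track=rewrite | github.com/TessFerrandez/algorithms | contest/w-11/lc-h-466-count-the-repetitions.py | getMaxRepetitions1
-- ===== SOURCE A (Python) =====
-- def getMaxRepetitions1(s1: str, n1: int, s2: str, n2: int) -> int:
--     count = index = 0
--     counts, indices = [], []
--
--     for i in range(n1):
--         for ch in s1:
--             if ch == s2[index]:
--                 index += 1
--                 if index == len(s2):
--                     count += 1
--                     index = 0
--
--         counts.append(count)
--         indices.append(index)
--
--         for ii in range(i):
--             if indices[ii] == index:
--                 prev = counts[ii]
--                 repeat = (count - prev) * ((n1 - 1 - ii) // (i - ii))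
--                 post = counts[ii + (n1 - 1 - ii) % (i - ii)] - counts[ii]
--                 return (prev + repeat + post) // n2
--
--     return counts[-1] // n2
-- ===== SOURCE B (Python) =====
-- def getMaxRepetitions1(s1: str, n1: int, s2: str, n2: int) -> int:
--     # Precompute a per-state transition table over s2-positions (one scan of s1
--     # per state), then walk the state graph block by block, skipping whole
--     # cycles arithmetically as soon as a state is revisited.
--     m = len(s2)
--     gain, nxt = [], []
--     for j in range(m):
--         c, pos = 0, j
--         for ch in s1:
--             if ch == s2[pos]:
--                 pos += 1
--                 if pos == m:
--                     c += 1
--                     pos = 0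
--         gain.append(c)
--         nxt.append(pos)
--
--     total, state, b = 0, 0, 0
--     seen = {}  # state -> (block, total) when first entered
--     while b < n1:
--         if state in seen:
--             b0, t0 = seen[state]
--             cycles = (n1 - b) // (b - b0)
--             total += cycles * (total - t0)
--             b += cycles * (b - b0)
--             break
--         seen[state] = (b, total)
--         total += gain[state]
--         state = nxt[state]
--         b += 1
--     while b < n1:
--         total += gain[state]
--         state = nxt[state]
--         b += 1
--     return total // n2
-- ===== Notes on version B (the rewrite author's own statement) =====
-- stated objective: alternative
-- what changed: A simulates block after block, rescanning its list of all previous end-states after every copy of s1; B first precomputes a per-state transition table (one scan of s1 for each position of s2: matches gained and next position), then walks the state graph in O(1) per block and, on the first revisited state, skips all whole cycles arithmetically and finishes the remainder by table walking - no counts/indices lists and no per-block rescan.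
-- outside the precondition, e.g. on getMaxRepetitions1('', 1, '', 1): A returns 0, B raises IndexError
import Mathlib
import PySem

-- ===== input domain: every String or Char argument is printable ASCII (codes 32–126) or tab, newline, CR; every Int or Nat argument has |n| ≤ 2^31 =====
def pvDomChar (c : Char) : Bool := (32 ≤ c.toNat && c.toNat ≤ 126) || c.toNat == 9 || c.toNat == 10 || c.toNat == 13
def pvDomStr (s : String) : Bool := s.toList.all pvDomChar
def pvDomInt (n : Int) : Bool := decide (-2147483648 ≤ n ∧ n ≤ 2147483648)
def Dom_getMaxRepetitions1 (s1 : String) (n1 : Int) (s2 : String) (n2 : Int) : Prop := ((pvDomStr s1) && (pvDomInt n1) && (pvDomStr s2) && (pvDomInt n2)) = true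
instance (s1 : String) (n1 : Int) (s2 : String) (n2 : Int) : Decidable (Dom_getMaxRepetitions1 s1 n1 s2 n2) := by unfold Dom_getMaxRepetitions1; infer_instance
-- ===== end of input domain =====

-- B replaces A's block-by-block simulation with per-block rescans of all previous
-- end-states by a precomputed per-state transition table over s2-positions plus a
-- state-graph walk that skips whole cycles arithmetically (objective: alternative).

-- ===== PORT A =====
-- the inner `for ch in s1` loop step, identical character by character in both
-- Pythons: `if ch == s2[pos]` is `pyGet? l2 pos = some ch` (exact; for s2 = ""
-- and nonempty s1 Python raises IndexError — excluded by Pre_)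
def pvStep (l2 : List Char) (st : Int × Int) (ch : Char) : Int × Int :=
  if PySem.List.pyGet? l2 st.2 = some ch then
    if st.2 + 1 = (l2.length : Int) then (st.1 + 1, 0) else (st.1, st.2 + 1)
  else st

def pvBlock (l1 l2 : List Char) (count index : Int) : Int × Int :=
  l1.foldl (pvStep l2) (count, index)

-- A's `for ii in range(i): if indices[ii] == index: return …` scan (first match)
def pvScanA (indices : List Int) (index : Int) : List Int → Option Int
  | [] => none
  | ii :: rest =>
      if PySem.List.pyGet? indices ii = some index then some ii else pvScanA indices index rest

-- A's `for i in range(n1)` loop; fuel = n1.toNat drives the recursion, i is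
-- Python's loop variable.  `counts[-1]` is `(pyGet? counts (-1)).getD 0`: the
-- default is reached only when counts = [] (n1 ≤ 0), where Python raises
-- IndexError — excluded by Pre_.
def pvGoA (l1 l2 : List Char) (n1 n2 : Int) :
    Nat → Int → Int → Int → List Int → List Int → Int
  | 0, _, _, _, counts, _ =>
      PySem.Int.floordiv ((PySem.List.pyGet? counts (-1)).getD 0) n2
  | fuel + 1, i, count, index, counts, indices =>
      let st := pvBlock l1 l2 count index
      let count := st.1
      let index := st.2
      let counts := counts ++ [count]
      let indices := indices ++ [index]
      match pvScanA indices index (PySem.List.pyRange 0 i 1) with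
      | some ii =>
          let prev := (PySem.List.pyGet? counts ii).getD 0
          let rep := (count - prev) * PySem.Int.floordiv (n1 - 1 - ii) (i - ii)
          let post := (PySem.List.pyGet? counts (ii + PySem.Int.mod (n1 - 1 - ii) (i - ii))).getD 0
                        - (PySem.List.pyGet? counts ii).getD 0
          PySem.Int.floordiv (prev + rep + post) n2
      | none => pvGoA l1 l2 n1 n2 fuel (i + 1) count index counts indices

def getMaxRepetitions1 (s1 : String) (n1 : Int) (s2 : String) (n2 : Int) : Int :=
  pvGoA s1.toList s2.toList n1 n2 n1.toNat 0 0 0 [] []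

-- ===== PORT B =====
-- Source B's table phase: for j in range(len(s2)) simulate one copy of s1 from
-- position j (the same character loop, so the same pvStep fold, started at (0, j)),
-- appending the gained match count and the next position.
def pvTable (l1 l2 : List Char) : List Int × List Int :=
  (PySem.List.pyRange 0 (l2.length : Int) 1).foldl
    (fun acc j =>
      let st := l1.foldl (pvStep l2) (0, j)
      (acc.1 ++ [st.1], acc.2 ++ [st.2])) ([], [])

-- Source B's second `while b < n1` loop: plain table walking for the remaining blocks.
-- `gain[state]` is `(pyGet? gain state).getD 0`; the default is unreachable under
-- Pre_ (s2 ≠ "" keeps every state inside the table).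
def pvWalk2 (gain nxt : List Int) : Nat → Int → Int → Int
  | 0, total, _ => total
  | k + 1, total, state =>
      pvWalk2 gain nxt k (total + (PySem.List.pyGet? gain state).getD 0)
        ((PySem.List.pyGet? nxt state).getD 0)

-- Source B's first `while b < n1` loop: `seen` maps a state to (block, total) when
-- first entered; on a revisit skip all whole cycles and break to the second loop.
def pvWalk1 (gain nxt : List Int) (n1 : Int) :
    Nat → Int → Int → Int → PySem.Dict Int (Int × Int) → Int
  | 0, _, total, _, _ => total
  | fuel + 1, b, total, state, seen =>
      match PySem.Dict.get? seen state with
      | some p =>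
          let cycles := PySem.Int.floordiv (n1 - b) (b - p.1)
          let total' := total + cycles * (total - p.2)
          let b' := b + cycles * (b - p.1)
          pvWalk2 gain nxt (n1 - b').toNat total' state
      | none =>
          pvWalk1 gain nxt n1 fuel (b + 1)
            (total + (PySem.List.pyGet? gain state).getD 0)
            ((PySem.List.pyGet? nxt state).getD 0)
            (seen.insert state (b, total))

def getMaxRepetitions1_alt (s1 : String) (n1 : Int) (s2 : String) (n2 : Int) : Int :=
  let t := pvTable s1.toList s2.toList
  PySem.Int.floordiv (pvWalk1 t.1 t.2 n1 n1.toNat 0 0 0 PySem.Dict.empty) n2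

-- ===== PRECONDITION & SPEC =====
-- Pre_ excludes n1 < 1 (A: IndexError on counts[-1]), n2 = 0 (ZeroDivisionError),
-- and s2 = "": for nonempty s1 A raises IndexError on s2[index]; for s1 = "" A
-- returns 0 but B's natural state walk has no state to start from and raises
-- IndexError (see claim.json cites).
def Pre_getMaxRepetitions1 (s1 : String) (n1 : Int) (s2 : String) (n2 : Int) : Prop :=
  1 ≤ n1 ∧ n2 ≠ 0 ∧ s2 ≠ ""
instance (s1 : String) (n1 : Int) (s2 : String) (n2 : Int) : Decidable (Pre_getMaxRepetitions1 s1 n1 s2 n2) := by unfold Pre_getMaxRepetitions1; infer_instance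

def pvWitness_getMaxRepetitions1 : String × Int × String × Int := ("acaab", 6, "ab", 2)

def Spec_getMaxRepetitions1 (s1 : String) (n1 : Int) (s2 : String) (n2 : Int) (out : Int) : Prop := out = getMaxRepetitions1_alt s1 n1 s2 n2
instance (s1 : String) (n1 : Int) (s2 : String) (n2 : Int) (out : Int) : Decidable (Spec_getMaxRepetitions1 s1 n1 s2 n2 out) := by unfold Spec_getMaxRepetitions1; infer_instance

-- ===== CLAIM (what is proved, stated in full; the proofs are below) =====
def Claim_equal_getMaxRepetitions1 : Prop := ∀ (s1 : String) (n1 : Int) (s2 : String) (n2 : Int), Dom_getMaxRepetitions1 s1 n1 s2 n2 → Pre_getMaxRepetitions1 s1 n1 s2 n2 → Spec_getMaxRepetitions1 s1 n1 s2 n2 (getMaxRepetitions1 s1 n1 s2 n2)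
-- ===== LEMMAS AND PROOFS =====

-- the mathematical block iteration both programs compute: k blocks from state j
def pvG (l1 l2 : List Char) : Nat → Int → Int × Int
  | 0, j => (0, j)
  | k + 1, j => pvBlock l1 l2 (pvG l1 l2 k j).1 (pvG l1 l2 k j).2

-- the count threads additively through one character step / one block
theorem pvStep_shift (l2 : List Char) (c j : Int) (ch : Char) :
    pvStep l2 (c, j) ch = ((pvStep l2 (0, j) ch).1 + c, (pvStep l2 (0, j) ch).2) := by
  simp only [pvStep]
  split_ifs <;> simp <;> ring

theorem pvBlock_shift (l1 l2 : List Char) : ∀ c j : Int,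
    pvBlock l1 l2 c j = ((pvBlock l1 l2 0 j).1 + c, (pvBlock l1 l2 0 j).2) := by
  induction l1 with
  | nil => intro c j; simp [pvBlock]
  | cons ch l1 ih =>
      intro c j
      have h1 : pvBlock (ch :: l1) l2 c j =
          pvBlock l1 l2 (pvStep l2 (c, j) ch).1 (pvStep l2 (c, j) ch).2 := by
        simp [pvBlock]
      have h2 : pvBlock (ch :: l1) l2 0 j =
          pvBlock l1 l2 (pvStep l2 (0, j) ch).1 (pvStep l2 (0, j) ch).2 := by
        simp [pvBlock]
      rw [h1, h2, pvStep_shift]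
      rw [ih ((pvStep l2 (0, j) ch).1 + c), ih ((pvStep l2 (0, j) ch).1)]
      ext <;> simp <;> ring

-- composing block iterations
theorem pvG_add (l1 l2 : List Char) (a : Nat) (j : Int) : ∀ b : Nat,
    pvG l1 l2 (a + b) j =
      ((pvG l1 l2 a j).1 + (pvG l1 l2 b (pvG l1 l2 a j).2).1,
       (pvG l1 l2 b (pvG l1 l2 a j).2).2) := by
  intro b
  induction b with
  | zero => simp [pvG]
  | succ b ih =>
      have : a + (b + 1) = (a + b) + 1 := by omega
      rw [this]
      show pvBlock l1 l2 (pvG l1 l2 (a + b) j).1 (pvG l1 l2 (a + b) j).2 = _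
      rw [ih]
      rw [pvBlock_shift]
      show _ = (_ + (pvBlock l1 l2 (pvG l1 l2 b (pvG l1 l2 a j).2).1 (pvG l1 l2 b (pvG l1 l2 a j).2).2).1,
                (pvBlock l1 l2 (pvG l1 l2 b (pvG l1 l2 a j).2).1 (pvG l1 l2 b (pvG l1 l2 a j).2).2).2)
      rw [pvBlock_shift l1 l2 (pvG l1 l2 b (pvG l1 l2 a j).2).1]
      ext <;> simp <;> ring

-- a cycle in the state graph multiplies its gain
theorem pvG_cycle (l1 l2 : List Char) (p : Nat) (j : Int)
    (h : (pvG l1 l2 p j).2 = j) : ∀ q : Nat,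
    pvG l1 l2 (q * p) j = ((q : Int) * (pvG l1 l2 p j).1, j) := by
  intro q
  induction q with
  | zero => simp [pvG]
  | succ q ih =>
      have : (q + 1) * p = q * p + p := by ring
      rw [this, pvG_add, ih]
      simp only [h]
      ext <;> simp <;> ring

-- states stay inside [0, len s2) when s2 is nonempty
theorem pvStep_range (l2 : List Char) (hl2 : l2 ≠ []) (st : Int × Int) (ch : Char)
    (h : 0 ≤ st.2 ∧ st.2 < (l2.length : Int)) :
    0 ≤ (pvStep l2 st ch).2 ∧ (pvStep l2 st ch).2 < (l2.length : Int) := by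
  have hlen : 1 ≤ (l2.length : Int) := by
    have : l2.length ≠ 0 := by simpa using hl2
    omega
  simp only [pvStep]
  split_ifs with h1 h2
  · simp; omega
  · simp; omega
  · exact h

theorem pvBlock_range (l1 l2 : List Char) (hl2 : l2 ≠ []) : ∀ c j : Int,
    0 ≤ j → j < (l2.length : Int) →
    0 ≤ (pvBlock l1 l2 c j).2 ∧ (pvBlock l1 l2 c j).2 < (l2.length : Int) := by
  induction l1 with
  | nil => intro c j h1 h2; exact ⟨h1, h2⟩
  | cons ch l1 ih =>
      intro c j h1 h2
      have hst := pvStep_range l2 hl2 (c, j) ch ⟨h1, h2⟩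
      have h1' : pvBlock (ch :: l1) l2 c j =
          pvBlock l1 l2 (pvStep l2 (c, j) ch).1 (pvStep l2 (c, j) ch).2 := by
        simp [pvBlock]
      rw [h1']
      exact ih _ _ hst.1 hst.2

theorem pvG_range (l1 l2 : List Char) (hl2 : l2 ≠ []) : ∀ n : Nat,
    0 ≤ (pvG l1 l2 n 0).2 ∧ (pvG l1 l2 n 0).2 < (l2.length : Int) := by
  intro n
  induction n with
  | zero =>
      have : l2.length ≠ 0 := by simpa using hl2
      simp [pvG]; omega
  | succ n ih =>
      show 0 ≤ (pvBlock l1 l2 (pvG l1 l2 n 0).1 (pvG l1 l2 n 0).2).2 ∧ _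
      exact pvBlock_range l1 l2 hl2 _ _ ih.1 ih.2

-- the table phase appends exactly the per-state block results
theorem pvTable_foldl (l1 l2 : List Char) : ∀ (L : List Int) (acc : List Int × List Int),
    L.foldl (fun acc j =>
        let st := l1.foldl (pvStep l2) (0, j)
        (acc.1 ++ [st.1], acc.2 ++ [st.2])) acc
      = (acc.1 ++ L.map (fun j => (pvBlock l1 l2 0 j).1),
         acc.2 ++ L.map (fun j => (pvBlock l1 l2 0 j).2)) := by
  intro L
  induction L with
  | nil => intro acc; simp
  | cons a L ih =>
      intro acc
      simp only [List.foldl_cons, List.map_cons]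
      rw [ih]
      simp [pvBlock, List.append_assoc]

theorem pvTable_eq (l1 l2 : List Char) :
    pvTable l1 l2 =
      ((List.range l2.length).map (fun (k : Nat) => (pvBlock l1 l2 0 (k : Int)).1),
       (List.range l2.length).map (fun (k : Nat) => (pvBlock l1 l2 0 (k : Int)).2)) := by
  unfold pvTable
  rw [PySem.List.pyRange_one, pvTable_foldl]
  simp only [List.nil_append, List.map_map, Prod.mk.injEq]
  constructor <;> (apply List.map_congr_left; intro k _; simp)

theorem pvMapRange_get (f : Nat → Int) (m t : Nat) (h : t < m) :
    (PySem.List.pyGet? ((List.range m).map f) ((t : Nat) : Int)).getD 0 = f t := by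
  simp [PySem.List.pyGet?_natCast, List.getElem?_map, List.getElem?_range, h]

theorem pvMapRange_get?_eq (f : Nat → Int) (m t : Nat) (h : t < m) :
    PySem.List.pyGet? ((List.range m).map f) ((t : Nat) : Int) = some (f t) := by
  simp [PySem.List.pyGet?_natCast, List.getElem?_map, List.getElem?_range, h]

theorem pvTable_get (l1 l2 : List Char) (j : Int) (h0 : 0 ≤ j) (h1 : j < (l2.length : Int)) :
    (PySem.List.pyGet? (pvTable l1 l2).1 j).getD 0 = (pvBlock l1 l2 0 j).1 ∧
    (PySem.List.pyGet? (pvTable l1 l2).2 j).getD 0 = (pvBlock l1 l2 0 j).2 := by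
  rw [pvTable_eq]
  dsimp only
  have hj : ((j.toNat : Nat) : Int) = j := Int.toNat_of_nonneg h0
  have hlt : j.toNat < l2.length := by omega
  rw [← hj]
  exact ⟨pvMapRange_get _ _ _ hlt, pvMapRange_get _ _ _ hlt⟩

-- one combined block step in table form
theorem pvG_succ_table (l1 l2 : List Char) (a : Nat) :
    pvG l1 l2 (a + 1) 0 =
      ((pvG l1 l2 a 0).1 + (pvBlock l1 l2 0 (pvG l1 l2 a 0).2).1,
       (pvBlock l1 l2 0 (pvG l1 l2 a 0).2).2) := by
  show pvBlock l1 l2 (pvG l1 l2 a 0).1 (pvG l1 l2 a 0).2 = _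
  rw [pvBlock_shift]
  ext <;> simp <;> ring

-- the plain table walk computes the block iteration
theorem pvWalk2_eq (l1 l2 : List Char) (hl2 : l2 ≠ []) : ∀ (k a : Nat),
    pvWalk2 (pvTable l1 l2).1 (pvTable l1 l2).2 k (pvG l1 l2 a 0).1 (pvG l1 l2 a 0).2
      = (pvG l1 l2 (a + k) 0).1 := by
  intro k
  induction k with
  | zero => intro a; simp [pvWalk2]
  | succ k ih =>
      intro a
      have hr := pvG_range l1 l2 hl2 a
      have hg := pvTable_get l1 l2 _ hr.1 hr.2
      rw [pvWalk2, hg.1, hg.2]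
      have h1 := pvG_succ_table l1 l2 a
      rw [show (pvG l1 l2 a 0).1 + (pvBlock l1 l2 0 (pvG l1 l2 a 0).2).1
            = (pvG l1 l2 (a + 1) 0).1 by rw [h1],
          show (pvBlock l1 l2 0 (pvG l1 l2 a 0).2).2 = (pvG l1 l2 (a + 1) 0).2 by rw [h1],
          ih (a + 1), show a + 1 + k = a + (k + 1) by omega]

-- the cycle-skipping walk computes the block iteration
theorem pvWalk1_eq (l1 l2 : List Char) (hl2 : l2 ≠ []) (N : Nat) :
    ∀ (fuel : Nat) (b : Nat) (seen : PySem.Dict Int (Int × Int)),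
      fuel + b = N →
      (∀ s v, PySem.Dict.get? seen s = some v →
         ∃ k : Nat, k < b ∧ v = ((k : Int), (pvG l1 l2 k 0).1) ∧ (pvG l1 l2 k 0).2 = s) →
      pvWalk1 (pvTable l1 l2).1 (pvTable l1 l2).2 (N : Int) fuel (b : Int)
          (pvG l1 l2 b 0).1 (pvG l1 l2 b 0).2 seen
        = (pvG l1 l2 N 0).1 := by
  intro fuel
  induction fuel with
  | zero =>
      intro b seen hfb _
      have hb : b = N := by omega
      subst hb
      simp [pvWalk1]
  | succ fuel ih =>
      intro b seen hfb hinv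
      rw [pvWalk1]
      cases hlook : PySem.Dict.get? seen (pvG l1 l2 b 0).2 with
      | none =>
          simp only
          have hr := pvG_range l1 l2 hl2 b
          have hg := pvTable_get l1 l2 _ hr.1 hr.2
          have h1 := pvG_succ_table l1 l2 b
          rw [hg.1, hg.2]
          rw [show (pvG l1 l2 b 0).1 + (pvBlock l1 l2 0 (pvG l1 l2 b 0).2).1
                = (pvG l1 l2 (b + 1) 0).1 by rw [h1],
              show (pvBlock l1 l2 0 (pvG l1 l2 b 0).2).2 = (pvG l1 l2 (b + 1) 0).2 by rw [h1]]
          rw [show ((b : Int) + 1) = ((b + 1 : Nat) : Int) by push_cast; ring]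
          apply ih (b + 1) _ (by omega)
          intro s v hv
          rw [PySem.Dict.get?_insert] at hv
          by_cases hs : s = (pvG l1 l2 b 0).2
          · rw [if_pos hs] at hv
            exact ⟨b, by omega, by cases hv; rfl, hs.symm⟩
          · rw [if_neg hs] at hv
            obtain ⟨k, hk, hvv, hkx⟩ := hinv s v hv
            exact ⟨k, by omega, hvv, hkx⟩
      | some p =>
          simp only
          obtain ⟨k, hkb, hv, hXk⟩ := hinv _ _ hlook
          subst hv
          have hbN : b < N := by omega
          set pN : Nat := b - k with hpN
          have hp : 0 < pN := by omega
          -- one cycle: pN blocks from state X k return to it, gaining C b - C k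
          have hadd := pvG_add l1 l2 k 0 pN
          rw [show k + pN = b by omega] at hadd
          have hD1 : (pvG l1 l2 pN (pvG l1 l2 k 0).2).1
              = (pvG l1 l2 b 0).1 - (pvG l1 l2 k 0).1 := by
            have h := congrArg Prod.fst hadd
            simp only at h
            omega
          have hD2 : (pvG l1 l2 pN (pvG l1 l2 k 0).2).2 = (pvG l1 l2 k 0).2 := by
            have h := congrArg Prod.snd hadd
            simp only at h
            exact (hXk.trans h).symm
          rw [← hXk]
          set q : Nat := (N - b) / pN with hq
          have hdiv : PySem.Int.floordiv ((N : Int) - (b : Int)) ((b : Int) - (k : Int)) = (q : Int) := by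
            rw [show ((N : Int) - (b : Int)) = ((N - b : Nat) : Int) by omega,
                show ((b : Int) - (k : Int)) = ((pN : Nat) : Int) by omega]
            rw [PySem.Int.floordiv_natCast]
          rw [hdiv]
          have hqp : q * pN ≤ N - b := Nat.div_mul_le_self _ _
          have hcyc := pvG_cycle l1 l2 pN (pvG l1 l2 k 0).2 hD2 q
          have hadd2 := pvG_add l1 l2 b 0 (q * pN)
          rw [← hXk, hcyc] at hadd2
          have htot : (pvG l1 l2 b 0).1
                + (q : Int) * ((pvG l1 l2 b 0).1 - (pvG l1 l2 k 0).1)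
              = (pvG l1 l2 (b + q * pN) 0).1 := by
            have h := congrArg Prod.fst hadd2
            simp only at h
            rw [h, hD1]
          have hstate : (pvG l1 l2 (b + q * pN) 0).2 = (pvG l1 l2 k 0).2 := by
            have h := congrArg Prod.snd hadd2
            simp only at h
            rw [h]
          have hfuel : ((N : Int) - ((b : Int) + (q : Int) * ((b : Int) - (k : Int)))).toNat
              = N - (b + q * pN) := by
            rw [show ((b : Int) - (k : Int)) = ((pN : Nat) : Int) by omega,
                show ((q : Int) * ((pN : Nat) : Int)) = ((q * pN : Nat) : Int) by push_cast; ring]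
            omega
          rw [hfuel, htot, ← hstate]
          rw [pvWalk2_eq l1 l2 hl2, show b + q * pN + (N - (b + q * pN)) = N by omega]

-- A's scan yields a position of the scanned range whose entry matches
theorem pvScanA_mem (inds : List Int) (v : Int) : ∀ (L : List Int) (ii : Int),
    pvScanA inds v L = some ii → ii ∈ L ∧ PySem.List.pyGet? inds ii = some v := by
  intro L
  induction L with
  | nil => intro ii h; simp [pvScanA] at h
  | cons a L ih =>
      intro ii h
      rw [pvScanA] at h
      split_ifs at h with hhit
      · cases h
        exact ⟨List.mem_cons_self, hhit⟩
      · obtain ⟨hm, hg⟩ := ih ii h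
        exact ⟨List.mem_cons_of_mem a hm, hg⟩

-- A's simulation-with-extrapolation computes the full block iteration
theorem pvGoA_eq (l1 l2 : List Char) (hl2 : l2 ≠ []) (N : Nat) (hN : 1 ≤ N) (n2 : Int) :
    ∀ (fuel m : Nat), fuel + m = N →
      pvGoA l1 l2 (N : Int) n2 fuel (m : Int) (pvG l1 l2 m 0).1 (pvG l1 l2 m 0).2
          ((List.range m).map (fun (k : Nat) => (pvG l1 l2 (k + 1) 0).1))
          ((List.range m).map (fun (k : Nat) => (pvG l1 l2 (k + 1) 0).2))
        = PySem.Int.floordiv (pvG l1 l2 N 0).1 n2 := by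
  intro fuel
  induction fuel with
  | zero =>
      intro m hfm
      have hm : m = N := by omega
      subst hm
      obtain ⟨M, rfl⟩ : ∃ M, m = M + 1 := ⟨m - 1, by omega⟩
      rw [pvGoA]
      rw [List.range_succ, List.map_append]
      simp [PySem.List.pyGet?_neg_one_append_singleton]
  | succ fuel ih =>
      intro m hfm
      rw [pvGoA]
      have hst : pvBlock l1 l2 (pvG l1 l2 m 0).1 (pvG l1 l2 m 0).2 = pvG l1 l2 (m + 1) 0 := rfl
      simp only [hst]
      have hcounts : (List.range m).map (fun (k : Nat) => (pvG l1 l2 (k + 1) 0).1)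
            ++ [(pvG l1 l2 (m + 1) 0).1]
          = (List.range (m + 1)).map (fun (k : Nat) => (pvG l1 l2 (k + 1) 0).1) := by
        simp [List.range_succ]
      have hinds : (List.range m).map (fun (k : Nat) => (pvG l1 l2 (k + 1) 0).2)
            ++ [(pvG l1 l2 (m + 1) 0).2]
          = (List.range (m + 1)).map (fun (k : Nat) => (pvG l1 l2 (k + 1) 0).2) := by
        simp [List.range_succ]
      rw [hcounts, hinds]
      cases hscan : pvScanA ((List.range (m + 1)).map (fun (k : Nat) => (pvG l1 l2 (k + 1) 0).2))
          (pvG l1 l2 (m + 1) 0).2 (PySem.List.pyRange 0 (m : Int) 1) with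
      | none =>
          simp only
          rw [show ((m : Int) + 1) = ((m + 1 : Nat) : Int) by push_cast; ring]
          exact ih (m + 1) (by omega)
      | some ii =>
          simp only
          obtain ⟨hmem, hget⟩ := pvScanA_mem _ _ _ _ hscan
          rw [PySem.List.mem_pyRange_one] at hmem
          set k : Nat := ii.toNat with hkdef
          have hik : ii = (k : Int) := by omega
          have hkm : k < m := by omega
          rw [hik] at hget
          -- the state after k+1 blocks equals the state after m+1 blocks
          have hXX : (pvG l1 l2 (k + 1) 0).2 = (pvG l1 l2 (m + 1) 0).2 :=
            Option.some.inj ((pvMapRange_get?_eq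
              (fun (k : Nat) => (pvG l1 l2 (k + 1) 0).2) (m + 1) k (by omega)).symm.trans hget)
          rw [hik]
          set pN : Nat := m - k with hpN
          have hp : 0 < pN := by omega
          set q : Nat := (N - 1 - k) / pN with hq
          set r : Nat := (N - 1 - k) % pN with hr
          have hrp : r < pN := Nat.mod_lt _ hp
          have hdecomp : N - 1 - k = q * pN + r := by
            rw [hq, hr]
            exact (Nat.div_add_mod' _ _).symm
          have hkN : k + 1 ≤ N - 1 := by omega
          have hcast1 : (N : Int) - 1 - (k : Int) = ((N - 1 - k : Nat) : Int) := by omega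
          have hcast2 : (m : Int) - (k : Int) = ((pN : Nat) : Int) := by omega
          rw [hcast1, hcast2, PySem.Int.floordiv_natCast, PySem.Int.mod_natCast,
              ← hq, ← hr]
          rw [show ((k : Int) + ((r : Nat) : Int)) = ((k + r : Nat) : Int) by push_cast; ring]
          rw [pvMapRange_get (fun (k : Nat) => (pvG l1 l2 (k + 1) 0).1) (m + 1) k (by omega),
              pvMapRange_get (fun (k : Nat) => (pvG l1 l2 (k + 1) 0).1) (m + 1) (k + r) (by omega)]
          congr 1
          -- the extrapolated value is the count after all N blocks
          have haddk := pvG_add l1 l2 (k + 1) 0 pN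
          rw [show k + 1 + pN = m + 1 by omega] at haddk
          have hcyc0 : (pvG l1 l2 pN (pvG l1 l2 (k + 1) 0).2).2 = (pvG l1 l2 (k + 1) 0).2 := by
            have h := congrArg Prod.snd haddk
            simp only at h
            exact (hXX.trans h).symm
          have hD : (pvG l1 l2 pN (pvG l1 l2 (k + 1) 0).2).1
              = (pvG l1 l2 (m + 1) 0).1 - (pvG l1 l2 (k + 1) 0).1 := by
            have h := congrArg Prod.fst haddk
            simp only at h
            omega
          have hcyc := pvG_cycle l1 l2 pN (pvG l1 l2 (k + 1) 0).2 hcyc0 q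
          have haddN := pvG_add l1 l2 (k + 1) 0 (q * pN + r)
          rw [show k + 1 + (q * pN + r) = N by omega] at haddN
          have haddsplit := pvG_add l1 l2 (q * pN) (pvG l1 l2 (k + 1) 0).2 r
          rw [hcyc] at haddsplit
          have haddr := pvG_add l1 l2 (k + 1) 0 r
          rw [show k + 1 + r = k + r + 1 by omega] at haddr
          have hCN := congrArg Prod.fst haddN
          rw [haddsplit] at hCN
          simp only at hCN
          have hCr := congrArg Prod.fst haddr
          simp only at hCr
          rw [hCN, hD, hCr]
          ring

-- ===== VERDICT (by name: the statements are the Claim_ definitions above) =====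
theorem getMaxRepetitions1_spec : Claim_equal_getMaxRepetitions1 := by
  intro s1 n1 s2 n2 _ hpre
  obtain ⟨hn1, hn2, hs2⟩ := hpre
  unfold Spec_getMaxRepetitions1 getMaxRepetitions1 getMaxRepetitions1_alt
  have hl2 : s2.toList ≠ [] := by
    intro h
    exact hs2 (by simpa using congrArg String.ofList h)
  set N : Nat := n1.toNat with hNdef
  have hN : 1 ≤ N := by omega
  have hn : n1 = (N : Int) := by omega
  rw [hn]
  have hA := pvGoA_eq s1.toList s2.toList hl2 N hN n2 N 0 (by omega)
  have hB := pvWalk1_eq s1.toList s2.toList hl2 N N 0 PySem.Dict.empty (by omega)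
    (by intro s v hv; rw [PySem.Dict.get?_empty] at hv; cases hv)
  simp only [show pvG s1.toList s2.toList 0 0 = (0, 0) from rfl, Nat.cast_zero,
    List.range_zero, List.map_nil] at hA hB
  exact hA.trans (congrArg (fun x => PySem.Int.floordiv x n2) hB).symm
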